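-- pv_equiv track=rewrite | github.com/pypi-data/pypi-mirror-375 | packages/mseep-mcp-server-fetch/mseep_mcp_server_fetch-0.6.4-py3-none-any.whl/mcp_server_fetch/server.py | _cleanup_extracted_text
-- ===== SOURCE A (Python) =====
-- def _cleanup_extracted_text(text: str) -> str:
--     """Clean up extracted text by stripping blank lines and extra whitespace."""
--     lines = [line.strip() for line in text.splitlines()]
--     # Remove empty lines and consecutive duplicates
--     clean_lines = []
--     prev_line = None
--     for line in lines:
--         if line and line != prev_line:
--             clean_lines.append(line)
--             prev_line = line
--     return "\n".join(clean_lines)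
-- ===== SOURCE B (Python) =====
-- def _cleanup_extracted_text(text: str) -> str:
--     """Clean up extracted text by stripping blank lines and extra whitespace."""
--     # Look-ahead formulation: filter the non-empty stripped lines, then pair each
--     # line with its successor and keep those whose successor DIFFERS, i.e. the
--     # LAST line of every run of equal consecutive lines.  A keeps the FIRST line
--     # of every run; since all lines of a run are equal strings, the two selections
--     # yield the same list.  (The "" sentinel never equals a kept line, so the
--     # final line is always kept.)
--     xs = [s for s in (line.strip() for line in text.splitlines()) if s]
--     return "\n".join(a for a, b in zip(xs, xs[1:] + [""]) if a != b)
-- ===== Notes on version B (the rewrite author's own statement) =====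
-- stated objective: alternative
-- what changed: Instead of A's stateful prev_line loop that keeps the FIRST line of each run of equal consecutive lines, B filters the stripped non-empty lines and then zips that list with its own tail, keeping each line whose successor differs, i.e. the LAST line of each run; the selections coincide because a run's lines are all equal.
import Mathlib
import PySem

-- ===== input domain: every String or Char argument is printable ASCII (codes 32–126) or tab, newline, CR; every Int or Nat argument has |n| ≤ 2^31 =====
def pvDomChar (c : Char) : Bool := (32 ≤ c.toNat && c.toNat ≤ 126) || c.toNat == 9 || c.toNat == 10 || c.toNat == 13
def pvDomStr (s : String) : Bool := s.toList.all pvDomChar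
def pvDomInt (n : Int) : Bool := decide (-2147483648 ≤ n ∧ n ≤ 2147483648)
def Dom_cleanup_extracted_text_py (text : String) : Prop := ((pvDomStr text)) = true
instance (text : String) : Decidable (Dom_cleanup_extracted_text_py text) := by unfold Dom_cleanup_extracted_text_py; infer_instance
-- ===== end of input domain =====

-- B replaces A's prev_line loop (keep the FIRST line of each run of equal consecutive
-- non-empty stripped lines) by a look-ahead pass: zip the filtered list with its tail
-- and keep each line whose successor differs (the LAST of each run); equal runs make
-- the two selections coincide (alternative decomposition; same cost).


-- ===== PORT A =====
-- the for-loop of A, state = (clean_lines, prev_line)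
def cleanupALoop (acc : List String) (prev : Option String) : List String → List String × Option String
  | [] => (acc, prev)
  | line :: rest =>
    if line ≠ "" ∧ some line ≠ prev then cleanupALoop (acc ++ [line]) (some line) rest
    else cleanupALoop acc prev rest

def cleanup_extracted_text_py (text : String) : String :=
  let lines := (PySem.Str.splitlines text).map PySem.Str.strip
  PySem.Str.join "\n" (cleanupALoop [] none lines).1

-- ===== PORT B =====
-- Source B's look-ahead selection: zip(xs, xs[1:] + [""]) and keep pairs whose components
-- differ (xs[1:] on a list is exactly List.drop 1).
def lookAhead (xs : List String) : List String :=
  ((xs.zip (xs.drop 1 ++ [""])).filter (fun p => !(p.1 == p.2))).map (·.1)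

def cleanup_extracted_text_py_alt (text : String) : String :=
  let xs := ((PySem.Str.splitlines text).map PySem.Str.strip).filter (fun s => decide (s ≠ ""))
  PySem.Str.join "\n" (lookAhead xs)

-- ===== PRECONDITION & SPEC =====
def Spec_cleanup_extracted_text_py (text : String) (out : String) : Prop := out = cleanup_extracted_text_py_alt text
instance (text : String) (out : String) : Decidable (Spec_cleanup_extracted_text_py text out) := by unfold Spec_cleanup_extracted_text_py; infer_instance

-- ===== CLAIM (what is proved, stated in full; the proofs are below) =====
def Claim_equal_cleanup_extracted_text_py : Prop := ∀ (text : String), Dom_cleanup_extracted_text_py text → Spec_cleanup_extracted_text_py text (cleanup_extracted_text_py text)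

-- ===== LEMMAS AND PROOFS =====

-- consecutive dedup relative to a "previous element" value: characterises A's loop
def consec (prev : Option String) : List String → List String
  | [] => []
  | x :: rest => if some x = prev then consec prev rest else x :: consec (some x) rest

theorem cleanupALoop_eq (ls : List String) : ∀ (acc : List String) (prev : Option String),
    (cleanupALoop acc prev ls).1 = acc ++ consec prev (ls.filter (fun s => decide (s ≠ ""))) := by
  induction ls with
  | nil => intro acc prev; simp [cleanupALoop, consec]
  | cons line rest ih =>
    intro acc prev
    by_cases h0 : line = ""
    · subst h0; simp [cleanupALoop, ih]
    · by_cases hp : some line = prev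
      · simp [cleanupALoop, h0, hp, ih, consec]
      · simp [cleanupALoop, h0, hp, ih, consec]

-- keeping the last of each run equals keeping the first, for lists of non-empty strings
theorem lookAhead_eq (xs : List String) (h : ∀ s ∈ xs, s ≠ "") :
    lookAhead xs = consec none xs := by
  induction xs with
  | nil => simp [lookAhead, consec]
  | cons x rest ih =>
    cases rest with
    | nil =>
      have hx : x ≠ "" := h x (by simp)
      simp [lookAhead, consec, hx]
    | cons y rest' =>
      have ih' := ih (fun s hs => h s (List.mem_cons_of_mem _ hs))
      by_cases hxy : x = y
      · subst hxy
        have hl : lookAhead (x :: x :: rest') = lookAhead (x :: rest') := by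
          simp [lookAhead]
        rw [hl, ih']
        simp [consec]
      · have hl : lookAhead (x :: y :: rest') = x :: lookAhead (y :: rest') := by
          simp [lookAhead, hxy]
        rw [hl, ih']
        simp [consec, Ne.symm hxy]

-- ===== VERDICT (by name: the statement is the Claim_ definition above) =====
theorem cleanup_extracted_text_py_spec : Claim_equal_cleanup_extracted_text_py := by
  intro text _
  unfold Spec_cleanup_extracted_text_py cleanup_extracted_text_py cleanup_extracted_text_py_alt
  simp only
  rw [cleanupALoop_eq, List.nil_append]
  rw [lookAhead_eq _ (fun s hs => by simpa using (List.mem_filter.mp hs).2)]
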